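-- pv_equiv track=rewrite | github.com/arseniylazarev7-ctrl/HOML_compiler | text_funces.py | split_last_char
-- ===== SOURCE A (Python) =====
-- def split_last_char(text, chars):
--     count = len(text)
--
--     while count > 0:
--         count -= 1
--         i = text[count]
--
--         if i in chars:
--             return text[:count], text[len(text[:count + 1]):]
--     return "", text
-- ===== SOURCE B (Python) =====
-- def split_last_char(text, chars):
--     idx = max((i for i, c in enumerate(text) if c in chars), default=-1)
--     if idx == -1:
--         return "", text
--     return text[:idx], text[idx + 1:]
-- ===== Notes on version B (the rewrite author's own statement) =====
-- stated objective: alternative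
-- what changed: Replaces A's backward while-loop with early exit by a single forward pass that aggregates the maximum matching index (max over enumerate, default -1) followed by one branch and two slices.
import Mathlib
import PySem

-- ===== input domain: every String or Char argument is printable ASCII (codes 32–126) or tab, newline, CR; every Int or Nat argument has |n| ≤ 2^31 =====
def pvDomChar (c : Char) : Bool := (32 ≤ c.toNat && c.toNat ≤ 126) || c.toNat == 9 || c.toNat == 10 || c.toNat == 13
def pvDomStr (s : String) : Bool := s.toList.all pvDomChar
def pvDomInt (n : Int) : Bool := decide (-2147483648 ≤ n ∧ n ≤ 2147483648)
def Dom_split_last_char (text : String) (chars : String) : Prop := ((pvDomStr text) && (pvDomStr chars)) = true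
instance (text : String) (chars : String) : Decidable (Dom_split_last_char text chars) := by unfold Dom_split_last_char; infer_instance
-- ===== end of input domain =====

-- B replaces A's backward while-loop (early exit at the last matching char) by a single
-- forward pass taking the maximum matching index (default -1) and then slicing once;
-- objective: alternative decomposition, same O(n) cost. Return values proved equal on all inputs.

-- ===== PORT A =====
-- A's while-loop: count runs len(text), len-1, …; at each step count -= 1, i = text[count],
-- and on a hit returns (text[:count], text[len(text[:count+1]):]).
def splitLoopA (tl cl : List Char) : Nat → String × String
  | 0 => ("", String.ofList tl)
  | n + 1 =>
    match PySem.List.pyGet? tl (n : Int) with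
    | none => ("", String.ofList tl)   -- unreachable: the loop index is always in range
    | some i =>
      if i ∈ cl then
        (String.ofList (PySem.List.slice tl none (some (n : Int))),
         String.ofList (PySem.List.slice tl
           (some ((PySem.List.slice tl none (some ((n : Int) + 1))).length : Int)) none))
      else splitLoopA tl cl n

def split_last_char (text : String) (chars : String) : String × String :=
  splitLoopA text.toList chars.toList text.toList.length

-- ===== PORT B =====
-- step of B's 'max((i for i, c in enumerate(text) if c in chars), default=-1)'
def lastHit (cl : List Char) (acc : Int) (p : Int × Char) : Int :=
  if p.2 ∈ cl then max acc p.1 else acc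

def split_last_char_alt (text : String) (chars : String) : String × String :=
  let idx := (PySem.List.enumerate text.toList 0).foldl (lastHit chars.toList) (-1)
  if idx = -1 then ("", text)
  else (String.ofList (PySem.List.slice text.toList none (some idx)),
        String.ofList (PySem.List.slice text.toList (some (idx + 1)) none))

-- ===== PRECONDITION & SPEC =====
def Spec_split_last_char (text : String) (chars : String) (out : String × String) : Prop := out = split_last_char_alt text chars
instance (text : String) (chars : String) (out : String × String) : Decidable (Spec_split_last_char text chars out) := by unfold Spec_split_last_char; infer_instance

-- ===== CLAIM (what is proved, stated in full; the proofs are below) =====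
def Claim_equal_split_last_char : Prop := ∀ (text : String) (chars : String), Dom_split_last_char text chars → Spec_split_last_char text chars (split_last_char text chars)

-- ===== LEMMAS AND PROOFS =====

-- the shape of both results as a function of the chosen split index
lemma lastHit_apply (cl : List Char) (acc i : Int) (c : Char) :
    lastHit cl acc (i, c) = if c ∈ cl then max acc i else acc := rfl

def resultOf (tl : List Char) (idx : Int) : String × String :=
  if idx = -1 then ("", String.ofList tl)
  else (String.ofList (PySem.List.slice tl none (some idx)),
        String.ofList (PySem.List.slice tl (some (idx + 1)) none))

lemma foldl_lastHit_le (cl : List Char) (l : List (Int × Char)) (acc b : Int)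
    (hacc : acc ≤ b) (hl : ∀ p ∈ l, p.1 ≤ b) : l.foldl (lastHit cl) acc ≤ b := by
  induction l generalizing acc with
  | nil => simp_all
  | cons p l ih =>
    simp only [List.foldl_cons]
    refine ih _ ?_ (fun q hq => hl q (List.mem_cons_of_mem _ hq))
    unfold lastHit
    split
    · exact max_le hacc (hl p (List.mem_cons_self))
    · exact hacc

lemma enumerate_take (tl : List Char) (n : Nat) (s : Int) :
    PySem.List.enumerate (tl.take n) s = (PySem.List.enumerate tl s).take n := by
  induction tl generalizing n s with
  | nil => simp [PySem.List.enumerate_nil]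
  | cons c tl ih =>
    cases n with
    | zero => simp [PySem.List.enumerate_cons]
    | succ m => simp [PySem.List.enumerate_cons, ih]

lemma fst_le_of_mem_enumerate_take (tl : List Char) (n : Nat) (p : Int × Char)
    (hp : p ∈ (PySem.List.enumerate tl 0).take n) : p.1 ≤ (n : Int) := by
  rw [← enumerate_take] at hp
  rcases (PySem.List.mem_enumerate_iff _ _ _).1 hp with ⟨k, hk, rfl⟩
  have : k ≤ n := le_of_lt (lt_of_lt_of_le hk (by simpa using List.length_take_le n tl))
  simp
  omega

lemma splitLoopA_eq (tl cl : List Char) (n : Nat) (hn : n ≤ tl.length) :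
    splitLoopA tl cl n
      = resultOf tl (((PySem.List.enumerate tl 0).take n).foldl (lastHit cl) (-1)) := by
  induction n with
  | zero => simp [splitLoopA, resultOf]
  | succ m ih =>
    have hm : m < tl.length := hn
    have hget : PySem.List.pyGet? tl (m : Int) = some tl[m] :=
      PySem.List.pyGet?_ofNat tl m hm
    have htake : (PySem.List.enumerate tl 0).take (m + 1)
        = (PySem.List.enumerate tl 0).take m ++ [((m : Int), tl[m])] := by
      rw [List.take_add_one]
      have : (PySem.List.enumerate tl 0)[m]? = some ((m : Int), tl[m]) := by
        rw [PySem.List.getElem?_enumerate]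
        simp [hm]
      simp [this]
    have hfoldle : ((PySem.List.enumerate tl 0).take m).foldl (lastHit cl) (-1) ≤ (m : Int) :=
      foldl_lastHit_le cl _ _ _ (by omega) (fun p hp => fst_le_of_mem_enumerate_take tl m p hp)
    rw [htake, List.foldl_append]
    simp only [splitLoopA, hget]
    by_cases hc : tl[m] ∈ cl
    · simp only [hc, if_pos, List.foldl_cons, List.foldl_nil]
      have hstep : lastHit cl (((PySem.List.enumerate tl 0).take m).foldl (lastHit cl) (-1))
          ((m : Int), tl[m]) = (m : Int) := by
        rw [lastHit_apply]
        simp [hc, max_eq_right hfoldle]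
      rw [hstep]
      unfold resultOf
      have hne : ((m : Int) ≠ -1) := by omega
      rw [if_neg hne]
      have h1 : PySem.List.slice tl none (some ((m : Int) + 1)) = tl.take (m + 1) := by
        have : ((m : Int) + 1) = ((m + 1 : Nat) : Int) := by push_cast; ring
        rw [this, PySem.List.slice_to_natCast]
      have h2 : (tl.take (m + 1)).length = m + 1 := by
        simp [Nat.min_eq_left hn]
      rw [h1, h2]
      have h3 : PySem.List.slice tl (some ((m + 1 : Nat) : Int)) none
          = PySem.List.slice tl (some ((m : Int) + 1)) none := by
        norm_num
      rw [h3]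
    · simp only [hc, if_neg, not_false_iff, List.foldl_cons, List.foldl_nil]
      have hstep : lastHit cl (((PySem.List.enumerate tl 0).take m).foldl (lastHit cl) (-1))
          ((m : Int), tl[m]) = ((PySem.List.enumerate tl 0).take m).foldl (lastHit cl) (-1) := by
        rw [lastHit_apply]; simp [hc]
      rw [hstep]
      exact ih (le_of_lt hm)

-- ===== VERDICT (by name: the statement is the Claim_ definition above) =====
theorem split_last_char_spec : Claim_equal_split_last_char := by
  intro text chars _
  unfold Spec_split_last_char split_last_char
  rw [splitLoopA_eq text.toList chars.toList text.toList.length (le_refl _)]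
  rw [List.take_of_length_le (by simp [PySem.List.length_enumerate])]
  simp only [split_last_char_alt]
  by_cases hF : (PySem.List.enumerate text.toList 0).foldl (lastHit chars.toList) (-1) = -1
  · simp [resultOf, hF]
  · simp [resultOf, hF]
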